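-- pv_equiv track=rewrite | github.com/eliottcassidy2000/math | 04-computation/p17_nonlinear_fit.py | all_circulant_tournaments
-- ===== SOURCE A (Python) =====
-- def all_circulant_tournaments(n):
--     pairs, used = [], set()
--     for a in range(1, n):
--         if a not in used:
--             b = n - a
--             if a == b: return []
--             pairs.append((a, b)); used.add(a); used.add(b)
--     results = []
--     for bits in range(2 ** len(pairs)):
--         S = [a if (bits >> i) & 1 else b for i, (a, b) in enumerate(pairs)]
--         results.append(tuple(sorted(S)))
--     return results
-- ===== SOURCE B (Python) =====
-- def all_circulant_tournaments(n):
--     pairs, used = [], set()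
--     for a in range(1, n):
--         if a not in used:
--             b = n - a
--             if a == b:
--                 return []
--             pairs.append((a, b)); used.add(a); used.add(b)
--
--     def rec(ps):
--         if not ps:
--             return [[]]
--         (a, b) = ps[0]
--         return [[c] + r for r in rec(ps[1:]) for c in (b, a)]
--
--     return [tuple(sorted(c)) for c in rec(pairs)]
-- ===== Notes on version B (the rewrite author's own statement) =====
-- stated objective: alternative
-- what changed: Replaced the bitmask-counter enumeration (decoding each counter value bit by bit with shifts) by a structural recursion over the pair list that builds every combination by choosing the second or first residue of the head pair around each tail combination; the pair-building prologue is kept.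
import Mathlib
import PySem

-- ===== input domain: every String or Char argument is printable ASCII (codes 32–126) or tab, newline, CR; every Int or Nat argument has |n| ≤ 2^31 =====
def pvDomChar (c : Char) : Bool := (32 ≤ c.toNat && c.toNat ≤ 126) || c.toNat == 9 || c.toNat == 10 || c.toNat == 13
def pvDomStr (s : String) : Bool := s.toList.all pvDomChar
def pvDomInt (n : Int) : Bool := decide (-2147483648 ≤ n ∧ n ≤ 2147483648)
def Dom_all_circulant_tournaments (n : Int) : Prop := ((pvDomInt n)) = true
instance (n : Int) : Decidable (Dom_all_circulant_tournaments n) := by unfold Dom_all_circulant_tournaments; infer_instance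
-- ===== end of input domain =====

-- B keeps A's pair-building prologue but replaces the bitmask-counter enumeration with a
-- structural recursion over the pair list (objective: alternative decomposition, same cost).

-- ===== PORT A =====
-- shared prologue of both Pythons: the 'for a in range(1, n)' pair-building loop;
-- returns none for the early 'return []' (a == b), else the built pair list
-- 'used' is Python's hash set; ported as Std.HashSet Int (same membership semantics,
-- constant-time 'a not in used' like CPython's set; its contents are never returned)
def acBuildPairs (n : Int) : List Int → List (Int × Int) → Std.HashSet Int → Option (List (Int × Int))
  | [], pairs, _ => some pairs
  | a :: rest, pairs, used =>
    if used.contains a then acBuildPairs n rest pairs used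
    else
      let b := n - a
      if a = b then none
      -- 'pairs.append((a, b))': the accumulator holds pairs reversed (consing = append),
      -- reversed back once at the end of the loop below
      else acBuildPairs n rest ((a, b) :: pairs) ((used.insert a).insert b)

-- the list comprehension building S for one value of bits
def acSel (pairs : List (Int × Int)) (bits : Nat) : List Int :=
  (PySem.List.enumerate pairs 0).map
    (fun p => if (bits >>> p.1.toNat) &&& 1 = 1 then p.2.1 else p.2.2)

def all_circulant_tournaments (n : Int) : List (List Int) :=
  match (acBuildPairs n (PySem.List.pyRange 1 n 1) [] Std.HashSet.emptyWithCapacity).map List.reverse with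
  | none => []
  | some pairs =>
      (List.range (2 ^ pairs.length)).foldl
        (fun results bits => results ++ [PySem.List.sorted (acSel pairs bits) (fun x => x) false]) []

-- ===== PORT B =====
-- rec(ps): choose b or a for the head pair around every combination for the tail
def acRec : List (Int × Int) → List (List Int)
  | [] => [[]]
  | (a, b) :: tail => (acRec tail).flatMap (fun r => [b :: r, a :: r])

def all_circulant_tournaments_alt (n : Int) : List (List Int) :=
  match (acBuildPairs n (PySem.List.pyRange 1 n 1) [] Std.HashSet.emptyWithCapacity).map List.reverse with
  | none => []
  | some pairs => (acRec pairs).map (fun c => PySem.List.sorted c (fun x => x) false)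

-- ===== PRECONDITION & SPEC =====
def Spec_all_circulant_tournaments (n : Int) (out : List (List Int)) : Prop := out = all_circulant_tournaments_alt n
instance (n : Int) (out : List (List Int)) : Decidable (Spec_all_circulant_tournaments n out) := by unfold Spec_all_circulant_tournaments; infer_instance

-- ===== CLAIM (what is proved, stated in full; the proofs are below) =====
def Claim_equal_all_circulant_tournaments : Prop := ∀ (n : Int), Dom_all_circulant_tournaments n → Spec_all_circulant_tournaments n (all_circulant_tournaments n)

-- ===== LEMMAS AND PROOFS =====

-- foldl appending singletons is map
theorem acFoldlAppend {α β : Type} (f : α → β) (l : List α) (acc : List β) :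
    l.foldl (fun res x => res ++ [f x]) acc = acc ++ l.map f := by
  induction l generalizing acc with
  | nil => simp
  | cons x t ih => simp [List.foldl, ih]

-- mapping over range(2*m) = flatMap of the even/odd pair over range(m)
theorem acRangeDouble {α : Type} (m : Nat) (g : Nat → α) :
    (List.range (2 * m)).map g = (List.range m).flatMap (fun q => [g (2 * q), g (2 * q + 1)]) := by
  induction m with
  | zero => simp
  | succ m ih =>
      have h : 2 * (m + 1) = (2 * m + 1) + 1 := by omega
      rw [h, List.range_succ, List.range_succ, List.map_append, List.map_append, ih,
        List.range_succ, List.flatMap_append]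
      simp

theorem acShiftEven (q i : Nat) : (2 * q) >>> (i + 1) = q >>> i := by
  rw [Nat.shiftRight_eq_div_pow, Nat.shiftRight_eq_div_pow, pow_succ, Nat.mul_comm (2 ^ i) 2,
    Nat.mul_div_mul_left _ _ (by norm_num : (0:Nat) < 2)]

theorem acShiftOdd (q i : Nat) : (2 * q + 1) >>> (i + 1) = q >>> i := by
  rw [Nat.shiftRight_eq_div_pow, Nat.shiftRight_eq_div_pow, pow_succ, Nat.mul_comm (2 ^ i) 2,
    ← Nat.div_div_eq_div_mul]
  congr 1
  omega

theorem acSelEven (a b : Int) (tail : List (Int × Int)) (q : Nat) :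
    acSel ((a, b) :: tail) (2 * q) = b :: acSel tail q := by
  simp only [acSel, PySem.List.enumerate_cons, List.map_cons]
  congr 1
  · have h0 : (2 * q) &&& 1 = 0 := by rw [Nat.and_one_is_mod]; omega
    simp [h0]
  · apply List.ext_getElem
    · simp
    · intro k h1 h2
      simp only [List.getElem_map, PySem.List.getElem_enumerate]
      have ht : ((0 : Int) + 1 + k).toNat = k + 1 := by omega
      have ht0 : ((0 : Int) + k).toNat = k := by omega
      rw [ht, ht0, acShiftEven]

theorem acSelOdd (a b : Int) (tail : List (Int × Int)) (q : Nat) :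
    acSel ((a, b) :: tail) (2 * q + 1) = a :: acSel tail q := by
  simp only [acSel, PySem.List.enumerate_cons, List.map_cons]
  congr 1
  · have h0 : (2 * q + 1) &&& 1 = 1 := by rw [Nat.and_one_is_mod]; omega
    simp [h0]
  · apply List.ext_getElem
    · simp
    · intro k h1 h2
      simp only [List.getElem_map, PySem.List.getElem_enumerate]
      have ht : ((0 : Int) + 1 + k).toNat = k + 1 := by omega
      have ht0 : ((0 : Int) + k).toNat = k := by omega
      rw [ht, ht0, acShiftOdd]

-- the heart: the bitmask enumeration in range order IS the structural recursion
theorem acEnumEqRec (pairs : List (Int × Int)) :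
    (List.range (2 ^ pairs.length)).map (acSel pairs) = acRec pairs := by
  induction pairs with
  | nil =>
      simp [acRec, acSel, PySem.List.enumerate]
  | cons p t ih =>
      obtain ⟨a, b⟩ := p
      have h : 2 ^ ((a, b) :: t).length = 2 * 2 ^ t.length := by
        simp [List.length_cons, pow_succ, Nat.mul_comm]
      rw [h, acRangeDouble, acRec, ← ih, List.flatMap_map]
      simp only [acSelEven, acSelOdd]

-- ===== VERDICT (by name: the statement is the Claim_ definition above) =====
theorem all_circulant_tournaments_spec : Claim_equal_all_circulant_tournaments := by
  intro n _
  unfold Spec_all_circulant_tournaments all_circulant_tournaments all_circulant_tournaments_alt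
  cases (acBuildPairs n (PySem.List.pyRange 1 n 1) [] Std.HashSet.emptyWithCapacity).map List.reverse with
  | none => rfl
  | some pairs =>
      simp only []
      rw [acFoldlAppend (fun bits => PySem.List.sorted (acSel pairs bits) (fun x => x) false),
        List.nil_append,
        show (fun bits => PySem.List.sorted (acSel pairs bits) (fun x => x) false)
           = (fun c => PySem.List.sorted c (fun x => x) false) ∘ acSel pairs from rfl,
        ← List.map_map, acEnumEqRec]
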